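-- pv_equiv track=rewrite | github.com/dsparber/advent-of-code | 2023/19/solution.py | bounds_for_constraints
-- ===== SOURCE A (Python) =====
-- def bounds_for_constraints(constraints: list[str]) -> dict[str, tuple[int, int]]:
--     variables = "xmas"
--     lower_bounds = {variable: [1] for variable in variables}
--     upper_bounds = {variable: [4000] for variable in variables}
--     for constraint in constraints:
--         if ">" in constraint:
--             variable, bound = constraint.split(">")
--             lower_bounds[variable].append(int(bound) + 1)
--         if "<" in constraint:
--             variable, bound = constraint.split("<")
--             upper_bounds[variable].append(int(bound) - 1)
--
--     return {k: (max(lower_bounds[k]), min(upper_bounds[k])) for k in variables}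
-- ===== SOURCE B (Python) =====
-- def bounds_for_constraints(constraints: list[str]) -> dict[str, tuple[int, int]]:
--     # per-variable scan with running extrema: no dicts of lists, no trailing max/min pass
--     result = {}
--     for v in "xmas":
--         lo, hi = 1, 4000
--         for c in constraints:
--             if c.startswith(v + ">"):
--                 lo = max(lo, int(c[2:]) + 1)
--             elif c.startswith(v + "<"):
--                 hi = min(hi, int(c[2:]) - 1)
--         result[v] = (lo, hi)
--     return result
-- ===== Notes on version B (the rewrite author's own statement) =====
-- stated objective: alternative
-- what changed: Replaces the dict-of-lists collection plus a trailing max/min pass by a per-variable scan (loops transposed: variables outer, constraints inner) that keeps scalar running max/min, matching each constraint by its 'v>'/'v<' prefix and slicing off the bound; trades one pass with dicts for four dict-free passes at the same asymptotic cost.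
import Mathlib
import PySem

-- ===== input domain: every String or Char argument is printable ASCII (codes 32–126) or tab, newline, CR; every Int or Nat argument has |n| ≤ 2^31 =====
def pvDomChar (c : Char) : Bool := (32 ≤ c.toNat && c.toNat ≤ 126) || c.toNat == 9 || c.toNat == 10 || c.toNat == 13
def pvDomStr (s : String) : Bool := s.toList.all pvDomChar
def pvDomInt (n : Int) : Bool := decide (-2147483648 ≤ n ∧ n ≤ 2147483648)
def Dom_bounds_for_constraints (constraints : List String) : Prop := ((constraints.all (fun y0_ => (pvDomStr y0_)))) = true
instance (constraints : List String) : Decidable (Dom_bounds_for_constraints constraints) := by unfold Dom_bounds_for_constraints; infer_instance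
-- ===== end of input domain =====

-- B replaces A's dict-of-lists collection (then max/min) by a per-variable scan with scalar running extrema (same cost; return value proved equal on Pre_).

-- ===== PORT A =====
-- loop body of A: '>' branch appends int(bound)+1 to lower_bounds[variable], '<' branch appends int(bound)-1 to upper_bounds[variable]
def stepA (st : PySem.Dict String (List Int) × PySem.Dict String (List Int)) (constraint : String) :
    PySem.Dict String (List Int) × PySem.Dict String (List Int) :=
  let st1 :=
    if PySem.Str.isIn ">" constraint then
      let parts := (PySem.Str.split? constraint ">").getD []
      let variable_ := parts.getD 0 ""
      let bound := parts.getD 1 ""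
      (st.1.modify variable_ [] (fun l => l ++ [(PySem.Int.ofStr? bound).getD 0 + 1]), st.2)
    else st
  if PySem.Str.isIn "<" constraint then
    let parts := (PySem.Str.split? constraint "<").getD []
    let variable_ := parts.getD 0 ""
    let bound := parts.getD 1 ""
    (st1.1, st1.2.modify variable_ [] (fun l => l ++ [(PySem.Int.ofStr? bound).getD 0 - 1]))
  else st1

def bounds_for_constraints (constraints : List String) : List (String × Int × Int) :=
  let variableNames := "xmas"
  let lower_bounds := variableNames.toList.foldl (fun d v => d.insert (String.ofList [v]) [(1 : Int)]) PySem.Dict.empty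
  let upper_bounds := variableNames.toList.foldl (fun d v => d.insert (String.ofList [v]) [(4000 : Int)]) PySem.Dict.empty
  let st := constraints.foldl stepA (lower_bounds, upper_bounds)
  variableNames.toList.map (fun k =>
    (String.ofList [k],
      (PySem.List.max? (st.1.getD (String.ofList [k]) []) (fun y => y)).getD 0,
      (PySem.List.min? (st.2.getD (String.ofList [k]) []) (fun y => y)).getD 0))

-- ===== PORT B =====
-- inner loop of B for variable v: running max of the lower bounds, running min of the upper bounds
def stepB (v : Char) (p : Int × Int) (c : String) : Int × Int :=
  if PySem.Str.startswith c (String.ofList [v, '>']) then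
    (max p.1 ((PySem.Int.ofStr? (PySem.Str.slice c (some 2) none)).getD 0 + 1), p.2)
  else if PySem.Str.startswith c (String.ofList [v, '<']) then
    (p.1, min p.2 ((PySem.Int.ofStr? (PySem.Str.slice c (some 2) none)).getD 0 - 1))
  else p

def bounds_for_constraints_alt (constraints : List String) : List (String × Int × Int) :=
  "xmas".toList.map (fun v =>
    let p := constraints.foldl (stepB v) ((1 : Int), (4000 : Int))
    (String.ofList [v], p.1, p.2))

-- ===== PRECONDITION & SPEC =====
-- okOp op c = true iff the op-branch of A's loop body does not raise on constraint c:
-- either op does not occur in c, or c is "<var><op><int-literal>" with var a single character of "xmas".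
def okOp (op : Char) (c : String) : Bool :=
  match c.toList with
  | v :: o :: rest =>
      if o = op then
        (v == 'x' || v == 'm' || v == 'a' || v == 's') && !(rest.contains op)
          && (PySem.Int.ofChars? rest).isSome
      else !(PySem.Str.isIn (String.ofList [op]) c)
  | _ => !(PySem.Str.isIn (String.ofList [op]) c)

-- Pre_ holds exactly on the inputs where A returns normally (elsewhere A raises KeyError or ValueError).
def Pre_bounds_for_constraints (constraints : List String) : Prop :=
  constraints.all (fun c => okOp '>' c && okOp '<' c) = true
instance (constraints : List String) : Decidable (Pre_bounds_for_constraints constraints) := by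
  unfold Pre_bounds_for_constraints; infer_instance

def pvWitness_bounds_for_constraints : List String := ["x>10", "m<200", "s> 40", "hello"]

def Spec_bounds_for_constraints (constraints : List String) (out : List (String × Int × Int)) : Prop :=
  out = bounds_for_constraints_alt constraints
instance (constraints : List String) (out : List (String × Int × Int)) :
    Decidable (Spec_bounds_for_constraints constraints out) := by
  unfold Spec_bounds_for_constraints; infer_instance

-- ===== CLAIM (what is proved, stated in full; the proofs are below) =====
def Claim_equal_bounds_for_constraints : Prop :=
  ∀ (constraints : List String), Dom_bounds_for_constraints constraints →
    Pre_bounds_for_constraints constraints →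
    Spec_bounds_for_constraints constraints (bounds_for_constraints constraints)

-- ===== LEMMAS AND PROOFS =====

-- the dict shape A's loop state always has: the four keys "x" "m" "a" "s" in order
def mkD (a b c d : List Int) : PySem.Dict String (List Int) :=
  PySem.Dict.mk [("x", a), ("m", b), ("a", c), ("s", d)]

-- the lower-bound values A collects for variable v (and B folds with max)
def lows (v : Char) (cs : List String) : List Int :=
  (cs.filter (fun c => PySem.Chars.startswith c.toList [v, '>'])).map
    (fun c => (PySem.Int.ofChars? (c.toList.drop 2)).getD 0 + 1)

-- the upper-bound values A collects for variable v (and B folds with min)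
def highs (v : Char) (cs : List String) : List Int :=
  (cs.filter (fun c => PySem.Chars.startswith c.toList [v, '<'])).map
    (fun c => (PySem.Int.ofChars? (c.toList.drop 2)).getD 0 - 1)

lemma go_nosep (op : Char) : ∀ (l : List Char) (fuel : Nat) (cur : List Char) (acc : List (List Char)),
    l.length ≤ fuel → l.contains op = false →
    PySem.Chars.splitOn.go [op] fuel l cur acc = ((cur.reverse ++ l) :: acc).reverse := by
  intro l
  induction l with
  | nil => intro fuel cur acc h1 h2; cases fuel <;> simp [PySem.Chars.splitOn.go]
  | cons c rest ih =>
    intro fuel cur acc h1 h2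
    cases fuel with
    | zero => simp at h1
    | succ f =>
      simp at h2
      rw [PySem.Chars.splitOn.go]
      simp [List.isPrefixOf]
      rw [ih f (c :: cur) acc (by simpa using h1) (by simp [h2.2])]
      simp
      exact fun h => absurd h h2.1

lemma splitOn_pair (op v : Char) (rest : List Char) (hv : v ≠ op) (hr : rest.contains op = false) :
    PySem.Chars.splitOn (v :: op :: rest) [op] = [[v], rest] := by
  rw [PySem.Chars.splitOn]
  rw [PySem.Chars.splitOn.go]
  simp [List.isPrefixOf, Ne.symm hv]
  rw [PySem.Chars.splitOn.go]
  simp [List.isPrefixOf]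
  rw [go_nosep op rest (rest.length + 1) [] [[v]] (by omega) hr]
  simp

lemma split?_pair (op v : Char) (rest : List Char) (c : String) (h : c.toList = v :: op :: rest)
    (hv : v ≠ op) (hr : rest.contains op = false) :
    PySem.Str.split? c (String.ofList [op]) = some [String.ofList [v], String.ofList rest] := by
  simp [PySem.Str.split?, PySem.Chars.split?, h, splitOn_pair op v rest hv hr]

lemma isIn_of_shape (op v : Char) (rest : List Char) (c : String) (h : c.toList = v :: op :: rest) :
    PySem.Str.isIn (String.ofList [op]) c = true := by
  have : [op] <:+: c.toList := ⟨[v], rest, by simp [h]⟩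
  simpa [PySem.Str.isIn, PySem.Chars.isIn_iff_infix] using this

lemma okOp_shape (op : Char) (c : String) (hok : okOp op c = true) :
    (PySem.Str.isIn (String.ofList [op]) c = false) ∨
    ∃ v rest, c.toList = v :: op :: rest ∧ (v = 'x' ∨ v = 'm' ∨ v = 'a' ∨ v = 's') ∧
      rest.contains op = false ∧ (PySem.Int.ofChars? rest).isSome = true := by
  unfold okOp at hok
  rcases hl : c.toList with _ | ⟨v, _ | ⟨o, rest⟩⟩
  · rw [hl] at hok; simp at hok; left; simp [hok]
  · rw [hl] at hok; simp at hok; left; simp [hok]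
  · rw [hl] at hok
    by_cases ho : o = op
    · subst ho
      simp at hok
      refine Or.inr ⟨v, rest, rfl, by tauto, by simpa using hok.1.2, hok.2⟩
    · simp [ho] at hok; left; simp [hok]

lemma startswith_false_of_not_isIn (op u : Char) (c : String)
    (h : PySem.Str.isIn (String.ofList [op]) c = false) :
    PySem.Chars.startswith c.toList [u, op] = false := by
  by_contra hne
  have h1 : PySem.Chars.startswith c.toList [u, op] = true := by
    revert hne; cases PySem.Chars.startswith c.toList [u, op] <;> simp
  have h2 : [u, op] <+: c.toList := by
    simpa [PySem.Chars.startswith, List.isPrefixOf_iff_prefix] using h1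
  obtain ⟨t, ht⟩ := h2
  have h3 := isIn_of_shape op u t c (by simp [← ht])
  simp [PySem.Str.isIn] at h3
  simp [PySem.Str.isIn, h3] at h

lemma slice2 (c : String) :
    PySem.Int.ofStr? (PySem.Str.slice c (some 2) none) = PySem.Int.ofChars? (c.toList.drop 2) := by
  simp [PySem.Int.ofStr?, PySem.Str.toList_slice, PySem.Chars.slice_eq_listSlice,
    PySem.List.slice_from (xs := c.toList) (a := 2) (by norm_num)]

lemma not_both (c : String) (v : Char) (h : PySem.Chars.startswith c.toList [v, '>'] = true) :
    PySem.Chars.startswith c.toList [v, '<'] = false := by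
  rcases hl : c.toList with _ | ⟨a, _ | ⟨b, t⟩⟩ <;>
    simp_all [PySem.Chars.startswith, List.isPrefixOf]
  rintro rfl
  exact absurd h.2 (by decide)

lemma foldB_eq (v : Char) (cs : List String) (p : Int × Int) :
    cs.foldl (stepB v) p = ((lows v cs).foldl max p.1, (highs v cs).foldl min p.2) := by
  induction cs generalizing p with
  | nil => simp [lows, highs]
  | cons c rest ih =>
    by_cases hgt : PySem.Chars.startswith c.toList [v, '>'] = true
    · have hlt := not_both c v hgt
      rw [List.foldl_cons]
      rw [show stepB v p c = (max p.1 ((PySem.Int.ofChars? (c.toList.drop 2)).getD 0 + 1), p.2) by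
        simp [stepB, hgt, slice2]]
      rw [ih]
      simp [lows, highs, hgt, hlt]
    · by_cases hlt : PySem.Chars.startswith c.toList [v, '<'] = true
      · rw [List.foldl_cons]
        rw [show stepB v p c = (p.1, min p.2 ((PySem.Int.ofChars? (c.toList.drop 2)).getD 0 - 1)) by
          simp [stepB, hgt, hlt, slice2]]
        rw [ih]
        simp [lows, highs, hgt, hlt]
      · rw [List.foldl_cons]
        rw [show stepB v p c = p by simp [stepB, hgt, hlt]]
        rw [ih]
        simp [lows, highs, hgt, hlt]

lemma foldA_eq (cs : List String) (h : ∀ c ∈ cs, (okOp '>' c && okOp '<' c) = true)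
    (lx lm la ls ux um ua us : List Int) :
    cs.foldl stepA (mkD lx lm la ls, mkD ux um ua us) =
      (mkD (lx ++ lows 'x' cs) (lm ++ lows 'm' cs) (la ++ lows 'a' cs) (ls ++ lows 's' cs),
       mkD (ux ++ highs 'x' cs) (um ++ highs 'm' cs) (ua ++ highs 'a' cs) (us ++ highs 's' cs)) := by
  induction cs generalizing lx lm la ls ux um ua us with
  | nil => simp [lows, highs]
  | cons c rest ih =>
    have hc : okOp '>' c = true ∧ okOp '<' c = true := by simpa using h c (by simp)
    have hrest : ∀ c' ∈ rest, (okOp '>' c' && okOp '<' c') = true :=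
      fun c' hmem => h c' (List.mem_cons_of_mem _ hmem)
    rcases okOp_shape '>' c hc.1 with hgt | ⟨v, rg, hsh, hv, hnr, hparse⟩
    · rcases okOp_shape '<' c hc.2 with hlt | ⟨w, rl, hshl, hw, hnrl, hparsel⟩
      · -- no operator in c
        have hgt' : PySem.Chars.isIn ['>'] c.toList = false := by
          simpa [PySem.Str.isIn] using hgt
        have hlt' : PySem.Chars.isIn ['<'] c.toList = false := by
          simpa [PySem.Str.isIn] using hlt
        rw [List.foldl_cons,
          show stepA (mkD lx lm la ls, mkD ux um ua us) c = (mkD lx lm la ls, mkD ux um ua us) from by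
            simp [stepA, PySem.Str.isIn, hgt', hlt'],
          ih hrest]
        simp [lows, highs, startswith_false_of_not_isIn '>' _ c hgt,
          startswith_false_of_not_isIn '<' _ c hlt]
      · -- c = w ++ "<" ++ rl
        have hgt' : PySem.Chars.isIn ['>'] c.toList = false := by
          simpa [PySem.Str.isIn] using hgt
        have hlt' : PySem.Chars.isIn ['<'] c.toList = true := by
          simpa [PySem.Str.isIn] using isIn_of_shape '<' w rl c hshl
        have hsplit : PySem.Str.split? c "<" = some [String.ofList [w], String.ofList rl] :=
          split?_pair '<' w rl c hshl (by rcases hw with rfl|rfl|rfl|rfl <;> decide) hnrl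
        rcases hw with rfl | rfl | rfl | rfl
        · rw [List.foldl_cons,
            show stepA (mkD lx lm la ls, mkD ux um ua us) c =
              (mkD lx lm la ls, mkD (ux ++ [(PySem.Int.ofChars? rl).getD 0 - 1]) um ua us) from by
              simp [stepA, PySem.Str.isIn, hgt', hlt', hsplit, PySem.Int.ofStr?,
                show String.ofList ['x'] = "x" from rfl, mkD, PySem.Dict.modify,
                PySem.Dict.insert, PySem.Dict.getD, PySem.Dict.get?_mk_cons, PySem.Dict.contains],
            ih hrest]
          simp [lows, highs, hshl, PySem.Chars.startswith, List.isPrefixOf]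
        · rw [List.foldl_cons,
            show stepA (mkD lx lm la ls, mkD ux um ua us) c =
              (mkD lx lm la ls, mkD ux (um ++ [(PySem.Int.ofChars? rl).getD 0 - 1]) ua us) from by
              simp [stepA, PySem.Str.isIn, hgt', hlt', hsplit, PySem.Int.ofStr?,
                show String.ofList ['m'] = "m" from rfl, mkD, PySem.Dict.modify,
                PySem.Dict.insert, PySem.Dict.getD, PySem.Dict.get?_mk_cons, PySem.Dict.contains],
            ih hrest]
          simp [lows, highs, hshl, PySem.Chars.startswith, List.isPrefixOf]
        · rw [List.foldl_cons,
            show stepA (mkD lx lm la ls, mkD ux um ua us) c =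
              (mkD lx lm la ls, mkD ux um (ua ++ [(PySem.Int.ofChars? rl).getD 0 - 1]) us) from by
              simp [stepA, PySem.Str.isIn, hgt', hlt', hsplit, PySem.Int.ofStr?,
                show String.ofList ['a'] = "a" from rfl, mkD, PySem.Dict.modify,
                PySem.Dict.insert, PySem.Dict.getD, PySem.Dict.get?_mk_cons, PySem.Dict.contains],
            ih hrest]
          simp [lows, highs, hshl, PySem.Chars.startswith, List.isPrefixOf]
        · rw [List.foldl_cons,
            show stepA (mkD lx lm la ls, mkD ux um ua us) c =
              (mkD lx lm la ls, mkD ux um ua (us ++ [(PySem.Int.ofChars? rl).getD 0 - 1])) from by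
              simp [stepA, PySem.Str.isIn, hgt', hlt', hsplit, PySem.Int.ofStr?,
                show String.ofList ['s'] = "s" from rfl, mkD, PySem.Dict.modify,
                PySem.Dict.insert, PySem.Dict.getD, PySem.Dict.get?_mk_cons, PySem.Dict.contains],
            ih hrest]
          simp [lows, highs, hshl, PySem.Chars.startswith, List.isPrefixOf]
    · -- c = v ++ ">" ++ rg
      have hlt : PySem.Str.isIn (String.ofList ['<']) c = false := by
        rcases okOp_shape '<' c hc.2 with hlt | ⟨w, rl, hshl, _, _, _⟩
        · exact hlt
        · rw [hsh] at hshl; simp at hshl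
      have hgt' : PySem.Chars.isIn ['>'] c.toList = true := by
        simpa [PySem.Str.isIn] using isIn_of_shape '>' v rg c hsh
      have hlt' : PySem.Chars.isIn ['<'] c.toList = false := by
        simpa [PySem.Str.isIn] using hlt
      have hsplit : PySem.Str.split? c ">" = some [String.ofList [v], String.ofList rg] :=
        split?_pair '>' v rg c hsh (by rcases hv with rfl|rfl|rfl|rfl <;> decide) hnr
      rcases hv with rfl | rfl | rfl | rfl
      · rw [List.foldl_cons,
          show stepA (mkD lx lm la ls, mkD ux um ua us) c =
            (mkD (lx ++ [(PySem.Int.ofChars? rg).getD 0 + 1]) lm la ls, mkD ux um ua us) from by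
            simp [stepA, PySem.Str.isIn, hgt', hlt', hsplit, PySem.Int.ofStr?,
              show String.ofList ['x'] = "x" from rfl, mkD, PySem.Dict.modify,
              PySem.Dict.insert, PySem.Dict.getD, PySem.Dict.get?_mk_cons, PySem.Dict.contains],
          ih hrest]
        simp [lows, highs, hsh, PySem.Chars.startswith, List.isPrefixOf]
      · rw [List.foldl_cons,
          show stepA (mkD lx lm la ls, mkD ux um ua us) c =
            (mkD lx (lm ++ [(PySem.Int.ofChars? rg).getD 0 + 1]) la ls, mkD ux um ua us) from by
            simp [stepA, PySem.Str.isIn, hgt', hlt', hsplit, PySem.Int.ofStr?,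
              show String.ofList ['m'] = "m" from rfl, mkD, PySem.Dict.modify,
              PySem.Dict.insert, PySem.Dict.getD, PySem.Dict.get?_mk_cons, PySem.Dict.contains],
          ih hrest]
        simp [lows, highs, hsh, PySem.Chars.startswith, List.isPrefixOf]
      · rw [List.foldl_cons,
          show stepA (mkD lx lm la ls, mkD ux um ua us) c =
            (mkD lx lm (la ++ [(PySem.Int.ofChars? rg).getD 0 + 1]) ls, mkD ux um ua us) from by
            simp [stepA, PySem.Str.isIn, hgt', hlt', hsplit, PySem.Int.ofStr?,
              show String.ofList ['a'] = "a" from rfl, mkD, PySem.Dict.modify,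
              PySem.Dict.insert, PySem.Dict.getD, PySem.Dict.get?_mk_cons, PySem.Dict.contains],
          ih hrest]
        simp [lows, highs, hsh, PySem.Chars.startswith, List.isPrefixOf]
      · rw [List.foldl_cons,
          show stepA (mkD lx lm la ls, mkD ux um ua us) c =
            (mkD lx lm la (ls ++ [(PySem.Int.ofChars? rg).getD 0 + 1]), mkD ux um ua us) from by
            simp [stepA, PySem.Str.isIn, hgt', hlt', hsplit, PySem.Int.ofStr?,
              show String.ofList ['s'] = "s" from rfl, mkD, PySem.Dict.modify,
              PySem.Dict.insert, PySem.Dict.getD, PySem.Dict.get?_mk_cons, PySem.Dict.contains],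
          ih hrest]
        simp [lows, highs, hsh, PySem.Chars.startswith, List.isPrefixOf]

-- ===== VERDICT (by name: the statement is the Claim_ definition above) =====
theorem bounds_for_constraints_spec : Claim_equal_bounds_for_constraints := by
  intro cs _ hpre
  have hpre' : ∀ c ∈ cs, (okOp '>' c && okOp '<' c) = true := by
    simpa [Pre_bounds_for_constraints, List.all_eq_true] using hpre
  unfold Spec_bounds_for_constraints
  simp only [bounds_for_constraints, bounds_for_constraints_alt]
  have h1 : ("xmas".toList.foldl (fun d v => d.insert (String.ofList [v]) [(1 : Int)]) PySem.Dict.empty)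
      = mkD [1] [1] [1] [1] := by rfl
  have h2 : ("xmas".toList.foldl (fun d v => d.insert (String.ofList [v]) [(4000 : Int)]) PySem.Dict.empty)
      = mkD [4000] [4000] [4000] [4000] := by rfl
  rw [h1, h2, foldA_eq cs hpre']
  have hx : "xmas".toList = ['x', 'm', 'a', 's'] := rfl
  rw [hx]
  simp only [List.map, foldB_eq]
  simp [mkD, PySem.Dict.getD, PySem.Dict.get?_mk_cons, PySem.List.max?_id_cons,
    PySem.List.min?_id_cons]
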